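-- pv_equiv track=rewrite | github.com/Dimitrije-Jimmy/AdventOfCode2024 | day15/main2.14.py | calculate_gps_sum_scaled
-- ===== SOURCE A (Python) =====
-- from typing import List, Tuple, Set
--
-- def calculate_gps_sum_scaled(
--     boxes: Set[Tuple[int, int]],
--     map_boundaries: Tuple[int, int, int, int]
-- ) -> int:
--     """
--     Calculates the sum of GPS coordinates of all boxes.
--
--     Args:
--         boxes (Set[Tuple[int, int]]): Coordinates of box left cells.
--         map_boundaries (Tuple[int, int, int, int]): Map boundaries.
--
--     Returns:
--         int: Sum of all boxes' GPS coordinates.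
--     """
--     min_x, min_y, max_x, max_y = map_boundaries
--     gps_sum = 0
--     for (x, y) in boxes:
--         distance_top = y - min_y
--         distance_left = x - min_x
--         gps = 100 * distance_top + distance_left
--         gps_sum += gps
--     return gps_sum
-- ===== SOURCE B (Python) =====
-- def calculate_gps_sum_scaled(boxes, map_boundaries):
--     min_x, min_y, max_x, max_y = map_boundaries
--     sum_x = sum(x for x, _ in boxes)
--     sum_y = sum(y for _, y in boxes)
--     n = len(boxes)
--     return 100 * (sum_y - n * min_y) + (sum_x - n * min_x)
-- ===== Notes on version B (the rewrite author's own statement) =====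
-- stated objective: alternative
-- what changed: Replaces the per-box GPS computation inside the loop by two raw coordinate sums plus the count, with the min-subtractions and the *100 factor applied once in a single closed-form affine expression at the end.
import Mathlib
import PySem

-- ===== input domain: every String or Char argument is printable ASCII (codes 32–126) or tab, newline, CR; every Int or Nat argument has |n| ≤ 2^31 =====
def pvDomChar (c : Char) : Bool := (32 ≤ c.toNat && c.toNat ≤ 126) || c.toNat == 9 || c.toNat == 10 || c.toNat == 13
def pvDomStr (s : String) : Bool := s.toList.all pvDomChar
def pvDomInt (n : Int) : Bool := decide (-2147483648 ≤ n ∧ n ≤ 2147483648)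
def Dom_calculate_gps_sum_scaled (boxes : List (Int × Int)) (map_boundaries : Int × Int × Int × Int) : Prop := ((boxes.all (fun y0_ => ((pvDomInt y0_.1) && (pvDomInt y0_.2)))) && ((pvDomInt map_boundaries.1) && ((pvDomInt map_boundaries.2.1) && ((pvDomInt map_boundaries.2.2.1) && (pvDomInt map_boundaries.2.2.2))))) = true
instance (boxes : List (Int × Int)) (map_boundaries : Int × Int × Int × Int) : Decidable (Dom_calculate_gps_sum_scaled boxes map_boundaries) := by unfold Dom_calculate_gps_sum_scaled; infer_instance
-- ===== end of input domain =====

-- ===== PORT A =====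
-- Port of A: one fold accumulating each box's GPS value 100*(y-min_y)+(x-min_x).
def calculate_gps_sum_scaled (boxes : List (Int × Int)) (map_boundaries : Int × Int × Int × Int) : Int :=
  let min_x := map_boundaries.1
  let min_y := map_boundaries.2.1
  boxes.foldl (fun gps_sum xy =>
    let distance_top := xy.2 - min_y
    let distance_left := xy.1 - min_x
    gps_sum + (100 * distance_top + distance_left)) 0

-- ===== PORT B =====
-- Port of B: raw coordinate sums and the count, then one closed-form affine expression.
def calculate_gps_sum_scaled_alt (boxes : List (Int × Int)) (map_boundaries : Int × Int × Int × Int) : Int :=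
  let min_x := map_boundaries.1
  let min_y := map_boundaries.2.1
  let sum_x := (boxes.map Prod.fst).sum
  let sum_y := (boxes.map Prod.snd).sum
  let n : Int := boxes.length
  100 * (sum_y - n * min_y) + (sum_x - n * min_x)

-- ===== PRECONDITION & SPEC =====
def Spec_calculate_gps_sum_scaled (boxes : List (Int × Int)) (map_boundaries : Int × Int × Int × Int) (out : Int) : Prop := out = calculate_gps_sum_scaled_alt boxes map_boundaries
instance (boxes : List (Int × Int)) (map_boundaries : Int × Int × Int × Int) (out : Int) : Decidable (Spec_calculate_gps_sum_scaled boxes map_boundaries out) := by unfold Spec_calculate_gps_sum_scaled; infer_instance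

-- ===== CLAIM (what is proved, stated in full; the proofs are below) =====
def Claim_equal_calculate_gps_sum_scaled : Prop := ∀ (boxes : List (Int × Int)) (map_boundaries : Int × Int × Int × Int), Dom_calculate_gps_sum_scaled boxes map_boundaries → Spec_calculate_gps_sum_scaled boxes map_boundaries (calculate_gps_sum_scaled boxes map_boundaries)

-- ===== LEMMAS AND PROOFS =====
lemma foldl_gps (boxes : List (Int × Int)) (min_x min_y acc : Int) :
    boxes.foldl (fun gps_sum xy =>
      gps_sum + (100 * (xy.2 - min_y) + (xy.1 - min_x))) acc
    = acc + (100 * ((boxes.map Prod.snd).sum - (boxes.length : Int) * min_y)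
        + ((boxes.map Prod.fst).sum - (boxes.length : Int) * min_x)) := by
  induction boxes generalizing acc with
  | nil => simp
  | cons hd tl ih =>
    simp only [List.foldl_cons, List.map_cons, List.sum_cons, List.length_cons, ih]
    push_cast
    ring

-- ===== VERDICT (by name: the statement is the Claim_ definition above) =====
theorem calculate_gps_sum_scaled_spec : Claim_equal_calculate_gps_sum_scaled := by
  intro boxes mb _
  unfold Spec_calculate_gps_sum_scaled calculate_gps_sum_scaled calculate_gps_sum_scaled_alt
  simpa using foldl_gps boxes mb.1 mb.2.1 0
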